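-- pv_equiv track=rewrite | github.com/lanl/T-ELF | TELF/pre_processing/Vulture/pre_process.py | _organize_simple_clean_defaults
-- ===== SOURCE A (Python) =====
-- def _organize_simple_clean_defaults(settings: dict) -> dict:
--     """
--     Organizes the default entries for the settings used in simple  cleaning.
--
--     Parameters
--     ----------
--     settings : dict
--         Dictionary of settings.
--
--     Returns
--     -------
--     dict
--         Default settings.
--
--     """
--     allowed_settings = ["make_hyphens_words", "remove_copyright_with_symbol", "remove_stop_phrases",
--                         "make_lower_case", "remove_next_line", "remove_email", "remove_dash",
--                         "remove_[]", "remove_()", "remove_\\", "remove_^", "remove_numbers", "remove_nonASCII",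
--                         "remove_tags", "remove_special_characters", "remove_between_[]", "remove_between_()",
--                         "check_char_length", "remove_stop_words", "remove_trailing_dash", "remove_standalone_numbers"]
--
--     for key, _ in settings.items():
--         assert key in allowed_settings, f'Unknown setting {key} for simple cleaning. Choose from: {", ".join(allowed_settings)}'
--
--     if "make_hyphens_words" not in settings:
--         settings["make_hyphens_words"] = False
--
--     if "remove_copyright_with_symbol" not in settings:
--         settings["remove_copyright_with_symbol"] = False
--
--     if "remove_stop_phrases" not in settings:
--         settings["remove_stop_phrases"] = False
--
--     if "make_lower_case" not in settings:
--         settings["make_lower_case"] = True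
--
--     if "remove_next_line" not in settings:
--         settings["remove_next_line"] = True
--
--     if "remove_email" not in settings:
--         settings["remove_email"] = True
--
--     if "remove_dash" not in settings:
--         settings["remove_dash"] = False
--
--     if "remove_[]" not in settings:
--         settings["remove_[]"] = True
--
--     if "remove_()" not in settings:
--         settings["remove_()"] = True
--
--     if "remove_\\" not in settings:
--         settings["remove_\\"] = True
--
--     if "remove_^" not in settings:
--         settings["remove_^"] = True
--
--     if "remove_numbers" not in settings:
--         settings["remove_numbers"] = True
--
--     if "remove_standalone_numbers":
--         settings["remove_standalone_numbers"] = False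
--
--     if "remove_nonASCII" not in settings:
--         settings["remove_nonASCII"] = True
--
--     if "remove_tags" not in settings:
--         settings["remove_tags"] = True
--
--     if "remove_special_characters" not in settings:
--         settings["remove_special_characters"] = True
--
--     if "remove_between_[]" not in settings:
--         settings["remove_between_[]"] = True
--
--     if "remove_between_()" not in settings:
--         settings["remove_between_()"] = True
--
--     if "check_char_length" not in settings:
--         settings["check_char_length"] = True
--
--     if "remove_stop_words" not in settings:
--         settings["remove_stop_words"] = True
--
--     if "remove_trailing_dash" not in settings:
--         settings["remove_trailing_dash"] = True
--
--
--     return settings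
-- ===== SOURCE B (Python) =====
-- def _organize_simple_clean_defaults(settings: dict) -> dict:
--     # Defaults table in A's fill order; B fixes A's always-true branch and only
--     # defaults remove_standalone_numbers to False when the user did not set it.
--     defaults = {
--         "make_hyphens_words": False,
--         "remove_copyright_with_symbol": False,
--         "remove_stop_phrases": False,
--         "make_lower_case": True,
--         "remove_next_line": True,
--         "remove_email": True,
--         "remove_dash": False,
--         "remove_[]": True,
--         "remove_()": True,
--         "remove_\\": True,
--         "remove_^": True,
--         "remove_numbers": True,
--         "remove_standalone_numbers": False,
--         "remove_nonASCII": True,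
--         "remove_tags": True,
--         "remove_special_characters": True,
--         "remove_between_[]": True,
--         "remove_between_()": True,
--         "check_char_length": True,
--         "remove_stop_words": True,
--         "remove_trailing_dash": True,
--     }
--     for key in settings:
--         assert key in defaults, f'Unknown setting {key} for simple cleaning. Choose from: {", ".join(defaults)}'
--     for k, v in defaults.items():
--         settings.setdefault(k, v)
--     return settings
-- ===== Notes on version B (the rewrite author's own statement) =====
-- stated objective: simpler
-- what changed: Replaces A's 21 hand-written `if key not in settings` blocks (plus an always-true `if "remove_standalone_numbers":` override) by a single defaults table filled in one setdefault pass, keeping the validation loop; B honours a user-supplied remove_standalone_numbers value instead of overwriting it.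
-- intended difference: On inputs that set "remove_standalone_numbers" to True, A's always-true `if "remove_standalone_numbers":` branch silently overwrites it to False, while B keeps the user's True, which is what the evidently intended `not in settings` guard would do. — e.g. on _organize_simple_clean_defaults([("remove_standalone_numbers", true)]): A returns [("remove_standalone_numbers", false), ("make_hyphens_words", false), ("remove_copyright_with_symbol", false), ("remove…, B returns [("remove_standalone_numbers", true), ("make_hyphens_words", false), ("remove_copyright_with_symbol", false), ("remove_…
import Mathlib
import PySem

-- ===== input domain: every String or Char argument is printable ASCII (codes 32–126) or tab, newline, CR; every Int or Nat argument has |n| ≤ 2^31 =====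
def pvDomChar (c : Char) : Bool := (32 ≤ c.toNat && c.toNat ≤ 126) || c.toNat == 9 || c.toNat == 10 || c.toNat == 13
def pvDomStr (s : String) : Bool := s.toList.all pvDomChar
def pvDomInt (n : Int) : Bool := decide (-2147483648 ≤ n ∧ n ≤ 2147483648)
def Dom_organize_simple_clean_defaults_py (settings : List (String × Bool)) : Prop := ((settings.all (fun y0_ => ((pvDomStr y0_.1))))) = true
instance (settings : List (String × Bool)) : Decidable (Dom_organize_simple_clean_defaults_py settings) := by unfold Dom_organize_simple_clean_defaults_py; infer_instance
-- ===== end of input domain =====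

-- B replaces A's 21 hand-written `if key not in settings` blocks by one defaults
-- table filled with setdefault in a single pass; B also fixes A's always-true
-- `if "remove_standalone_numbers":` branch (see D_ below).  A mutates its dict
-- argument in place; the equivalence proved here is about the RETURN value only.


-- ===== PORT A =====
-- `if <key> not in settings: settings[<key>] = <v>` (the statement pattern A repeats 20 times)
def pySetIfMissing (d : PySem.Dict String Bool) (k : String) (v : Bool) : PySem.Dict String Bool :=
  if d.contains k then d else d.insert k v

-- A's assert loop only raises (on a key outside allowed_settings); those inputs are excluded by Pre_ below.
def organize_simple_clean_defaults_py (settings : List (String × Bool)) : List (String × Bool) :=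
  let d := PySem.Dict.ofList settings
  let d := pySetIfMissing d "make_hyphens_words" false
  let d := pySetIfMissing d "remove_copyright_with_symbol" false
  let d := pySetIfMissing d "remove_stop_phrases" false
  let d := pySetIfMissing d "make_lower_case" true
  let d := pySetIfMissing d "remove_next_line" true
  let d := pySetIfMissing d "remove_email" true
  let d := pySetIfMissing d "remove_dash" false
  let d := pySetIfMissing d "remove_[]" true
  let d := pySetIfMissing d "remove_()" true
  let d := pySetIfMissing d "remove_\\" true
  let d := pySetIfMissing d "remove_^" true
  let d := pySetIfMissing d "remove_numbers" true
  let d := d.insert "remove_standalone_numbers" false  -- A: `if "remove_standalone_numbers":` is always truthy, so this assignment is unconditional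
  let d := pySetIfMissing d "remove_nonASCII" true
  let d := pySetIfMissing d "remove_tags" true
  let d := pySetIfMissing d "remove_special_characters" true
  let d := pySetIfMissing d "remove_between_[]" true
  let d := pySetIfMissing d "remove_between_()" true
  let d := pySetIfMissing d "check_char_length" true
  let d := pySetIfMissing d "remove_stop_words" true
  let d := pySetIfMissing d "remove_trailing_dash" true
  d.items

-- ===== PORT B =====
def pvDefaultsB : List (String × Bool) := [
  ("make_hyphens_words", false),
  ("remove_copyright_with_symbol", false),
  ("remove_stop_phrases", false),
  ("make_lower_case", true),
  ("remove_next_line", true),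
  ("remove_email", true),
  ("remove_dash", false),
  ("remove_[]", true),
  ("remove_()", true),
  ("remove_\\", true),
  ("remove_^", true),
  ("remove_numbers", true),
  ("remove_standalone_numbers", false),
  ("remove_nonASCII", true),
  ("remove_tags", true),
  ("remove_special_characters", true),
  ("remove_between_[]", true),
  ("remove_between_()", true),
  ("check_char_length", true),
  ("remove_stop_words", true),
  ("remove_trailing_dash", true)]

def organize_simple_clean_defaults_py_alt (settings : List (String × Bool)) : List (String × Bool) :=
  -- for k, v in defaults.items(): settings.setdefault(k, v)
  (pvDefaultsB.foldl (fun d p => d.setdefault p.1 p.2) (PySem.Dict.ofList settings)).items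

-- ===== PRECONDITION & SPEC =====
def pvAllowedKeys : List String := ["make_hyphens_words", "remove_copyright_with_symbol", "remove_stop_phrases", "make_lower_case", "remove_next_line", "remove_email", "remove_dash", "remove_[]", "remove_()", "remove_\\", "remove_^", "remove_numbers", "remove_nonASCII", "remove_tags", "remove_special_characters", "remove_between_[]", "remove_between_()", "check_char_length", "remove_stop_words", "remove_trailing_dash", "remove_standalone_numbers"]

-- Pre_ excludes exactly the inputs with a key outside allowed_settings, on which A's assert raises AssertionError.
def Pre_organize_simple_clean_defaults_py (settings : List (String × Bool)) : Prop :=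
  ∀ p ∈ settings, p.1 ∈ pvAllowedKeys
instance (settings : List (String × Bool)) : Decidable (Pre_organize_simple_clean_defaults_py settings) := by unfold Pre_organize_simple_clean_defaults_py; infer_instance
def pvWitness_organize_simple_clean_defaults_py : (List (String × Bool)) := [("make_lower_case", false)]

-- When the user explicitly sets "remove_standalone_numbers" to True, A's always-true `if "remove_standalone_numbers":`
-- silently overwrites it to False; B keeps the user's True, which is what the guard was evidently meant to do.
def D_organize_simple_clean_defaults_py (settings : List (String × Bool)) : Prop :=
  (PySem.Dict.ofList settings).getD "remove_standalone_numbers" false = true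
instance (settings : List (String × Bool)) : Decidable (D_organize_simple_clean_defaults_py settings) := by unfold D_organize_simple_clean_defaults_py; infer_instance

def Spec_organize_simple_clean_defaults_py (settings : List (String × Bool)) (out : List (String × Bool)) : Prop := ¬ D_organize_simple_clean_defaults_py settings → out = organize_simple_clean_defaults_py_alt settings
instance (settings : List (String × Bool)) (out : List (String × Bool)) : Decidable (Spec_organize_simple_clean_defaults_py settings out) := by unfold Spec_organize_simple_clean_defaults_py; infer_instance

def pvDiffWitness_organize_simple_clean_defaults_py : (List (String × Bool)) := [("remove_standalone_numbers", true)]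
def pvDiffWitnessOut_organize_simple_clean_defaults_py : (List (String × Bool)) × (List (String × Bool)) :=
  ([("remove_standalone_numbers", false), ("make_hyphens_words", false), ("remove_copyright_with_symbol", false), ("remove_stop_phrases", false), ("make_lower_case", true), ("remove_next_line", true), ("remove_email", true), ("remove_dash", false), ("remove_[]", true), ("remove_()", true), ("remove_\\", true), ("remove_^", true), ("remove_numbers", true), ("remove_nonASCII", true), ("remove_tags", true), ("remove_special_characters", true), ("remove_between_[]", true), ("remove_between_()", true), ("check_char_length", true), ("remove_stop_words", true), ("remove_trailing_dash", true)],
   [("remove_standalone_numbers", true), ("make_hyphens_words", false), ("remove_copyright_with_symbol", false), ("remove_stop_phrases", false), ("make_lower_case", true), ("remove_next_line", true), ("remove_email", true), ("remove_dash", false), ("remove_[]", true), ("remove_()", true), ("remove_\\", true), ("remove_^", true), ("remove_numbers", true), ("remove_nonASCII", true), ("remove_tags", true), ("remove_special_characters", true), ("remove_between_[]", true), ("remove_between_()", true), ("check_char_length", true), ("remove_stop_words", true), ("remove_trailing_dash", true)])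

-- ===== CLAIM (what is proved, stated in full; the proofs are below) =====
def Claim_unchanged_organize_simple_clean_defaults_py : Prop := ∀ (settings : List (String × Bool)), Dom_organize_simple_clean_defaults_py settings → Pre_organize_simple_clean_defaults_py settings → Spec_organize_simple_clean_defaults_py settings (organize_simple_clean_defaults_py settings)
def Claim_changed_organize_simple_clean_defaults_py : Prop := Dom_organize_simple_clean_defaults_py (pvDiffWitness_organize_simple_clean_defaults_py) ∧ Pre_organize_simple_clean_defaults_py (pvDiffWitness_organize_simple_clean_defaults_py) ∧ D_organize_simple_clean_defaults_py (pvDiffWitness_organize_simple_clean_defaults_py) ∧ organize_simple_clean_defaults_py (pvDiffWitness_organize_simple_clean_defaults_py) = pvDiffWitnessOut_organize_simple_clean_defaults_py.1 ∧ organize_simple_clean_defaults_py_alt (pvDiffWitness_organize_simple_clean_defaults_py) = pvDiffWitnessOut_organize_simple_clean_defaults_py.2 ∧ pvDiffWitnessOut_organize_simple_clean_defaults_py.1 ≠ pvDiffWitnessOut_organize_simple_clean_defaults_py.2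
def Claim_exact_organize_simple_clean_defaults_py : Prop := ∀ (settings : List (String × Bool)), Dom_organize_simple_clean_defaults_py settings → Pre_organize_simple_clean_defaults_py settings → D_organize_simple_clean_defaults_py settings → organize_simple_clean_defaults_py settings ≠ organize_simple_clean_defaults_py_alt settings

-- ===== LEMMAS AND PROOFS =====
theorem setdefault_eq_pySetIfMissing (d : PySem.Dict String Bool) (k : String) (v : Bool) :
    d.setdefault k v = pySetIfMissing d k v := by
  unfold pySetIfMissing
  by_cases hc : d.contains k = true
  · rw [PySem.Dict.setdefault_of_contains _ _ hc, if_pos hc]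
  · rw [PySem.Dict.setdefault_of_not_contains _ _ (Bool.eq_false_iff.mpr hc), if_neg hc]

theorem nodup_pySetIfMissing (d : PySem.Dict String Bool) (k : String) (v : Bool)
    (h : d.keys.Nodup) : (pySetIfMissing d k v).keys.Nodup := by
  unfold pySetIfMissing; split
  · exact h
  · exact PySem.Dict.nodup_keys_insert _ _ _ h

theorem getD_pySetIfMissing_ne (d : PySem.Dict String Bool) (k : String) (v : Bool)
    (k' : String) (h : k' ≠ k) :
    (pySetIfMissing d k v).getD k' false = d.getD k' false := by
  unfold pySetIfMissing; split
  · rfl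
  · exact PySem.Dict.getD_insert_of_ne _ _ _ h

theorem insert_self_of_get? (d : PySem.Dict String Bool) (k : String) (v : Bool)
    (hnd : d.keys.Nodup) (hg : d.get? k = some v) : d.insert k v = d := by
  apply PySem.Dict.ext
  have hc : d.contains k := by
    rw [PySem.Dict.contains_eq_isSome_get?, hg]; rfl
  rw [PySem.Dict.items_insert_of_contains _ _ hc]
  have hid : ∀ p ∈ d.items, (if p.1 == k then (k, v) else p) = p := by
    intro p hp
    by_cases he : p.1 == k
    · have hk : p.1 = k := by simpa using he
      have hp' : (k, p.2) ∈ d.items := by rw [← hk]; exact hp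
      have hgv := PySem.Dict.get?_of_mem_items _ hp' hnd
      rw [hg] at hgv
      have hv : v = p.2 := by injection hgv
      simp [hv, ← hk]
    · simp [he]
  calc d.items.map (fun p => if p.1 == k then (k, v) else p)
      = d.items.map id := List.map_congr_left hid
    _ = d.items := List.map_id _

theorem key13 (d : PySem.Dict String Bool) (hnd : d.keys.Nodup)
    (hg : d.getD "remove_standalone_numbers" false = false) :
    d.insert "remove_standalone_numbers" false = pySetIfMissing d "remove_standalone_numbers" false := by
  unfold pySetIfMissing; split
  · next hc =>
    have hs : (d.get? "remove_standalone_numbers").isSome := by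
      rw [← PySem.Dict.contains_eq_isSome_get?]; exact hc
    obtain ⟨v, hv⟩ := Option.isSome_iff_exists.mp hs
    have hvf : v = false := by
      rw [PySem.Dict.getD_eq_get?_getD, hv] at hg; exact hg
    exact insert_self_of_get? d _ false hnd (hvf ▸ hv)
  · rfl

theorem pre_getD (d : PySem.Dict String Bool) :
    ((pySetIfMissing (pySetIfMissing (pySetIfMissing (pySetIfMissing (pySetIfMissing (pySetIfMissing (pySetIfMissing (pySetIfMissing (pySetIfMissing (pySetIfMissing (pySetIfMissing (pySetIfMissing d "make_hyphens_words" false) "remove_copyright_with_symbol" false) "remove_stop_phrases" false) "make_lower_case" true) "remove_next_line" true) "remove_email" true) "remove_dash" false) "remove_[]" true) "remove_()" true) "remove_\\" true) "remove_^" true) "remove_numbers" true)).getD "remove_standalone_numbers" false = d.getD "remove_standalone_numbers" false := by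
  rw [getD_pySetIfMissing_ne _ "remove_numbers" _ "remove_standalone_numbers" (by decide),
      getD_pySetIfMissing_ne _ "remove_^" _ "remove_standalone_numbers" (by decide),
      getD_pySetIfMissing_ne _ "remove_\\" _ "remove_standalone_numbers" (by decide),
      getD_pySetIfMissing_ne _ "remove_()" _ "remove_standalone_numbers" (by decide),
      getD_pySetIfMissing_ne _ "remove_[]" _ "remove_standalone_numbers" (by decide),
      getD_pySetIfMissing_ne _ "remove_dash" _ "remove_standalone_numbers" (by decide),
      getD_pySetIfMissing_ne _ "remove_email" _ "remove_standalone_numbers" (by decide),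
      getD_pySetIfMissing_ne _ "remove_next_line" _ "remove_standalone_numbers" (by decide),
      getD_pySetIfMissing_ne _ "make_lower_case" _ "remove_standalone_numbers" (by decide),
      getD_pySetIfMissing_ne _ "remove_stop_phrases" _ "remove_standalone_numbers" (by decide),
      getD_pySetIfMissing_ne _ "remove_copyright_with_symbol" _ "remove_standalone_numbers" (by decide),
      getD_pySetIfMissing_ne _ "make_hyphens_words" _ "remove_standalone_numbers" (by decide)]

theorem pre_nodup (d : PySem.Dict String Bool) (hnd : d.keys.Nodup) :
    ((pySetIfMissing (pySetIfMissing (pySetIfMissing (pySetIfMissing (pySetIfMissing (pySetIfMissing (pySetIfMissing (pySetIfMissing (pySetIfMissing (pySetIfMissing (pySetIfMissing (pySetIfMissing d "make_hyphens_words" false) "remove_copyright_with_symbol" false) "remove_stop_phrases" false) "make_lower_case" true) "remove_next_line" true) "remove_email" true) "remove_dash" false) "remove_[]" true) "remove_()" true) "remove_\\" true) "remove_^" true) "remove_numbers" true)).keys.Nodup := by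
  repeat apply nodup_pySetIfMissing
  exact hnd

theorem post_getD (d : PySem.Dict String Bool) :
    ((pySetIfMissing (pySetIfMissing (pySetIfMissing (pySetIfMissing (pySetIfMissing (pySetIfMissing (pySetIfMissing (pySetIfMissing d "remove_nonASCII" true) "remove_tags" true) "remove_special_characters" true) "remove_between_[]" true) "remove_between_()" true) "check_char_length" true) "remove_stop_words" true) "remove_trailing_dash" true)).getD "remove_standalone_numbers" false = d.getD "remove_standalone_numbers" false := by
  rw [getD_pySetIfMissing_ne _ "remove_trailing_dash" _ "remove_standalone_numbers" (by decide),
      getD_pySetIfMissing_ne _ "remove_stop_words" _ "remove_standalone_numbers" (by decide),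
      getD_pySetIfMissing_ne _ "check_char_length" _ "remove_standalone_numbers" (by decide),
      getD_pySetIfMissing_ne _ "remove_between_()" _ "remove_standalone_numbers" (by decide),
      getD_pySetIfMissing_ne _ "remove_between_[]" _ "remove_standalone_numbers" (by decide),
      getD_pySetIfMissing_ne _ "remove_special_characters" _ "remove_standalone_numbers" (by decide),
      getD_pySetIfMissing_ne _ "remove_tags" _ "remove_standalone_numbers" (by decide),
      getD_pySetIfMissing_ne _ "remove_nonASCII" _ "remove_standalone_numbers" (by decide)]

theorem mid_eq (d : PySem.Dict String Bool) (hnd : d.keys.Nodup)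
    (hg : d.getD "remove_standalone_numbers" false = false) :
    ((pySetIfMissing (pySetIfMissing (pySetIfMissing (pySetIfMissing (pySetIfMissing (pySetIfMissing (pySetIfMissing (pySetIfMissing (pySetIfMissing (pySetIfMissing (pySetIfMissing (pySetIfMissing d "make_hyphens_words" false) "remove_copyright_with_symbol" false) "remove_stop_phrases" false) "make_lower_case" true) "remove_next_line" true) "remove_email" true) "remove_dash" false) "remove_[]" true) "remove_()" true) "remove_\\" true) "remove_^" true) "remove_numbers" true)).insert "remove_standalone_numbers" false = pySetIfMissing ((pySetIfMissing (pySetIfMissing (pySetIfMissing (pySetIfMissing (pySetIfMissing (pySetIfMissing (pySetIfMissing (pySetIfMissing (pySetIfMissing (pySetIfMissing (pySetIfMissing (pySetIfMissing d "make_hyphens_words" false) "remove_copyright_with_symbol" false) "remove_stop_phrases" false) "make_lower_case" true) "remove_next_line" true) "remove_email" true) "remove_dash" false) "remove_[]" true) "remove_()" true) "remove_\\" true) "remove_^" true) "remove_numbers" true)) "remove_standalone_numbers" false := by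
  apply key13
  · exact pre_nodup d hnd
  · rw [pre_getD]; exact hg

theorem pySetIfMissing_of_contains (d : PySem.Dict String Bool) (k : String) (v : Bool)
    (hc : d.contains k = true) : pySetIfMissing d k v = d := by
  unfold pySetIfMissing; rw [if_pos hc]

theorem contains_of_getD_true (d : PySem.Dict String Bool) (k : String)
    (h : d.getD k false = true) : d.contains k = true := by
  rw [PySem.Dict.contains_eq_isSome_get?]
  cases hx : d.get? k with
  | none => rw [PySem.Dict.getD_eq_get?_getD, hx] at h; simp at h
  | some v => rfl

-- ===== VERDICT (by name: the statement is the Claim_ definition above) =====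
theorem organize_simple_clean_defaults_py_spec : Claim_unchanged_organize_simple_clean_defaults_py := by
  intro settings hdom hpre
  unfold Spec_organize_simple_clean_defaults_py
  intro hD
  unfold D_organize_simple_clean_defaults_py at hD
  have hg : (PySem.Dict.ofList settings).getD "remove_standalone_numbers" false = false :=
    Bool.eq_false_iff.mpr hD
  have hnd : (PySem.Dict.ofList settings).keys.Nodup := PySem.Dict.nodup_keys_ofList _
  simp only [organize_simple_clean_defaults_py, organize_simple_clean_defaults_py_alt, pvDefaultsB, List.foldl_cons, List.foldl_nil, setdefault_eq_pySetIfMissing]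
  rw [mid_eq _ hnd hg]

theorem organize_simple_clean_defaults_py_changed : Claim_changed_organize_simple_clean_defaults_py := by
  unfold Claim_changed_organize_simple_clean_defaults_py; decide

theorem organize_simple_clean_defaults_py_tight : Claim_exact_organize_simple_clean_defaults_py := by
  intro settings hdom hpre hD heq
  unfold D_organize_simple_clean_defaults_py at hD
  simp only [organize_simple_clean_defaults_py, organize_simple_clean_defaults_py_alt, pvDefaultsB, List.foldl_cons, List.foldl_nil, setdefault_eq_pySetIfMissing] at heq
  have hdict := PySem.Dict.ext heq
  have h2 := congrArg (fun x => PySem.Dict.getD x "remove_standalone_numbers" false) hdict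
  simp only [post_getD, PySem.Dict.getD_insert_self] at h2
  have hc := contains_of_getD_true _ _ ((pre_getD (PySem.Dict.ofList settings)).trans hD)
  rw [pySetIfMissing_of_contains _ _ _ hc, pre_getD, hD] at h2
  exact absurd h2 (by decide)
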